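-- pv_equiv track=rewrite | github.com/songzy12/TopCoder-SRM | srm655/BichromeBoard.py | ableToDraw
-- ===== SOURCE A (Python) =====
-- def ableToDraw(board):
--     parity = None
--     check = ''
--     possible = True
--     for i in range(len(board)):
--         for j in range(len(board[i])):
--             if board[i][j] == '?':
--                 continue
--             if parity == None:
--                 parity = (i + j) % 2
--                 check = board[i][j]
--                 continue
--             if ((i + j) % 2 == parity and board[i][j] != check or
--                 (i + j) % 2 != parity and board[i][j] == check):
--                 possible = False
--                 break
--     if possible:
--         return 'Possible'
--     return 'Impossible'
-- ===== SOURCE B (Python) =====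
-- def ableToDraw(board):
--     cells = [((i + j) % 2, c)
--              for i, row in enumerate(board)
--              for j, c in enumerate(row)
--              if c != '?']
--     if not cells:
--         return 'Possible'
--     p, check = cells[0]
--     same = {c for q, c in cells if q == p}
--     other = {c for q, c in cells if q != p}
--     if same <= {check} and check not in other:
--         return 'Possible'
--     return 'Impossible'
-- ===== Notes on version B (the rewrite author's own statement) =====
-- stated objective: alternative
-- what changed: Replaced A's single stateful scan (mutable parity/check with an early break) by a two-phase formulation: find the first non-'?' cell as reference, then aggregate the colors of each parity class into two sets and decide by set relations (same-parity set subset of {check}, check absent from the other set).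
import Mathlib
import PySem

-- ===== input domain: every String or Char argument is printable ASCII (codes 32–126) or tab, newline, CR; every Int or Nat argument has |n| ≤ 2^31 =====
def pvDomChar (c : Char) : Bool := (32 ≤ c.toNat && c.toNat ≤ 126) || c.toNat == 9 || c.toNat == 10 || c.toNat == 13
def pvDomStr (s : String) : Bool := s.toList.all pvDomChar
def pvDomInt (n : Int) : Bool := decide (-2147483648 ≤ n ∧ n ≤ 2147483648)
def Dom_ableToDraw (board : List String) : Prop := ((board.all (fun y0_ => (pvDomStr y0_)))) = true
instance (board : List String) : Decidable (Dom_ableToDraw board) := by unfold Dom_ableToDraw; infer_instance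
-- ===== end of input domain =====

-- B replaces A's single stateful scan (mutable parity/check with an early break) by a
-- two-phase reformulation: find the first non-'?' cell, aggregate each parity class's
-- colors into two sets, and decide by set relations (objective: alternative decomposition).

-- ===== PORT A =====
-- Inner loop over one row (characters of board[i], j counting up); Python keeps the
-- reference in two variables `parity` (None until set) and `check` (read only once
-- parity is set), modelled here as one Option pair `ref`.  Returning instead of
-- recursing models the `break`.
def ableToDrawRow (i j : Int) (cs : List Char) (ref : Option (Int × Char)) (possible : Bool) :
    Option (Int × Char) × Bool :=
  match cs with
  | [] => (ref, possible)
  | c :: rest =>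
    if c = '?' then ableToDrawRow i (j + 1) rest ref possible
    else
      match ref with
      | none => ableToDrawRow i (j + 1) rest (some (PySem.Int.mod (i + j) 2, c)) possible
      | some (p, chk) =>
        if (PySem.Int.mod (i + j) 2 = p ∧ c ≠ chk) ∨ (PySem.Int.mod (i + j) 2 ≠ p ∧ c = chk)
        then (some (p, chk), false)   -- possible = False; break
        else ableToDrawRow i (j + 1) rest (some (p, chk)) possible

-- Outer loop over the rows (i counting up).
def ableToDrawRows (i : Int) (rows : List String) (ref : Option (Int × Char)) (possible : Bool) :
    Option (Int × Char) × Bool :=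
  match rows with
  | [] => (ref, possible)
  | r :: rest =>
    let st := ableToDrawRow i 0 r.toList ref possible
    ableToDrawRows (i + 1) rest st.1 st.2

def ableToDraw (board : List String) : String :=
  if (ableToDrawRows 0 board none true).2 then "Possible" else "Impossible"

-- ===== PORT B =====
-- cells = [((i + j) % 2, c) for i, row in enumerate(board) for j, c in enumerate(row) if c != '?']
def altCells (board : List String) : List (Int × Char) :=
  (PySem.List.enumerate board 0).flatMap (fun ir =>
    (PySem.List.enumerate ir.2.toList 0).filterMap (fun jc =>
      if jc.2 ≠ '?' then some (PySem.Int.mod (ir.1 + jc.1) 2, jc.2) else none))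

def ableToDraw_alt (board : List String) : String :=
  let cells := altCells board
  match cells with
  | [] => "Possible"
  | (p, check) :: _ =>
    let same : PySem.Set Char :=
      PySem.Set.ofList (cells.filterMap (fun qc => if qc.1 = p then some qc.2 else none))
    let other : PySem.Set Char :=
      PySem.Set.ofList (cells.filterMap (fun qc => if qc.1 ≠ p then some qc.2 else none))
    if PySem.Set.issubset same (PySem.Set.add PySem.Set.empty check)
        && !(PySem.Set.contains other check)
    then "Possible" else "Impossible"

-- ===== PRECONDITION & SPEC =====
def Spec_ableToDraw (board : List String) (out : String) : Prop := out = ableToDraw_alt board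
instance (board : List String) (out : String) : Decidable (Spec_ableToDraw board out) := by unfold Spec_ableToDraw; infer_instance

-- ===== CLAIM (what is proved, stated in full; the proofs are below) =====
def Claim_equal_ableToDraw : Prop := ∀ (board : List String), Dom_ableToDraw board → Spec_ableToDraw board (ableToDraw board)

-- ===== LEMMAS AND PROOFS =====

-- a cell (q, c) is consistent with reference (p, chk) iff (q = p) exactly when (c = chk)
def okCell (p : Int) (chk : Char) (qc : Int × Char) : Bool := (qc.1 == p) == (qc.2 == chk)

-- the (parity, color) pairs of the non-'?' cells of one row suffix, in order
def rowCells (i j : Int) (cs : List Char) : List (Int × Char) :=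
  match cs with
  | [] => []
  | c :: rest =>
    if c = '?' then rowCells i (j + 1) rest
    else (PySem.Int.mod (i + j) 2, c) :: rowCells i (j + 1) rest

def cellsFrom (i : Int) (rows : List String) : List (Int × Char) :=
  match rows with
  | [] => []
  | r :: rest => rowCells i 0 r.toList ++ cellsFrom (i + 1) rest

lemma okCell_iff (p : Int) (chk : Char) (qc : Int × Char) :
    okCell p chk qc = true ↔ ¬ ((qc.1 = p ∧ qc.2 ≠ chk) ∨ (qc.1 ≠ p ∧ qc.2 = chk)) := by
  simp [okCell]
  by_cases h1 : qc.1 = p <;> by_cases h2 : qc.2 = chk <;> simp [h1, h2]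

lemma ableToDrawRow_some (i : Int) (cs : List Char) (p : Int) (chk : Char) :
    ∀ (j : Int) (b : Bool),
    ableToDrawRow i j cs (some (p, chk)) b
      = (some (p, chk), b && (rowCells i j cs).all (okCell p chk)) := by
  induction cs with
  | nil => intro j b; simp [ableToDrawRow, rowCells]
  | cons c rest ih =>
    intro j b
    by_cases h : c = '?'
    · simp [ableToDrawRow, rowCells, h, ih]
    · simp only [ableToDrawRow, rowCells, if_neg h]
      split_ifs with hv
      · have hok : okCell p chk (PySem.Int.mod (i + j) 2, c) = false := by
          rw [Bool.eq_false_iff, Ne, okCell_iff]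
          exact not_not_intro hv
        simp only [List.all_cons, hok, Bool.false_and, Bool.and_false]
      · have hok : okCell p chk (PySem.Int.mod (i + j) 2, c) = true := by
          rw [okCell_iff]; simpa using hv
        simp only [List.all_cons, hok, Bool.true_and, ih]

lemma ableToDrawRow_none (i : Int) (cs : List Char) :
    ∀ (j : Int) (b : Bool),
    ableToDrawRow i j cs none b
      = (match rowCells i j cs with
         | [] => (none, b)
         | (p, c) :: rest => (some (p, c), b && rest.all (okCell p c))) := by
  induction cs with
  | nil => intro j b; simp [ableToDrawRow, rowCells]
  | cons c rest ih =>
    intro j b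
    by_cases h : c = '?'
    · simp [ableToDrawRow, rowCells, h, ih]
    · simp [ableToDrawRow, rowCells, h, ableToDrawRow_some]

lemma ableToDrawRows_some (rows : List String) (p : Int) (chk : Char) :
    ∀ (i : Int) (b : Bool),
    ableToDrawRows i rows (some (p, chk)) b
      = (some (p, chk), b && (cellsFrom i rows).all (okCell p chk)) := by
  induction rows with
  | nil => intro i b; simp [ableToDrawRows, cellsFrom]
  | cons r rest ih =>
    intro i b
    simp [ableToDrawRows, cellsFrom, ableToDrawRow_some, ih, Bool.and_assoc]

lemma ableToDrawRows_none (rows : List String) :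
    ∀ (i : Int) (b : Bool),
    ableToDrawRows i rows none b
      = (match cellsFrom i rows with
         | [] => (none, b)
         | (p, c) :: rest => (some (p, c), b && rest.all (okCell p c))) := by
  induction rows with
  | nil => intro i b; simp [ableToDrawRows, cellsFrom]
  | cons r rest ih =>
    intro i b
    simp only [ableToDrawRows, cellsFrom, ableToDrawRow_none]
    cases hrc : rowCells i 0 r.toList with
    | nil => simp [ih]
    | cons pc tail =>
      obtain ⟨p, c⟩ := pc
      simp [ableToDrawRows_some, Bool.and_assoc]

lemma ableToDraw_char (board : List String) :
    ableToDraw board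
      = (match cellsFrom 0 board with
         | [] => "Possible"
         | (p, c) :: rest => if rest.all (okCell p c) then "Possible" else "Impossible") := by
  unfold ableToDraw
  rw [ableToDrawRows_none]
  cases h : cellsFrom 0 board with
  | nil => simp
  | cons pc rest =>
    obtain ⟨p, c⟩ := pc
    simp only [Bool.true_and]

lemma rowCells_eq (i : Int) (cs : List Char) :
    ∀ (j : Int),
    (PySem.List.enumerate cs j).filterMap
        (fun jc => if jc.2 ≠ '?' then some (PySem.Int.mod (i + jc.1) 2, jc.2) else none)
      = rowCells i j cs := by
  induction cs with
  | nil => intro j; simp [PySem.List.enumerate_nil, rowCells]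
  | cons c rest ih =>
    intro j
    rw [PySem.List.enumerate_cons, List.filterMap_cons]
    by_cases h : c = '?'
    · simp only [rowCells, h]
      simpa using ih (j + 1)
    · simp only [rowCells, if_neg h]
      have hne : ((j, c) : Int × Char).2 ≠ '?' := h
      simp only [if_pos hne]
      rw [ih (j + 1)]

lemma altCells_eq (board : List String) :
    altCells board = cellsFrom 0 board := by
  unfold altCells
  suffices h : ∀ (i : Int),
      (PySem.List.enumerate board i).flatMap (fun ir =>
        (PySem.List.enumerate ir.2.toList 0).filterMap (fun jc =>
          if jc.2 ≠ '?' then some (PySem.Int.mod (ir.1 + jc.1) 2, jc.2) else none))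
      = cellsFrom i board by exact h 0
  induction board with
  | nil => intro i; simp [PySem.List.enumerate_nil, cellsFrom]
  | cons r rest ih =>
    intro i
    have h1 := rowCells_eq i r.toList 0
    have h2 := ih (i + 1)
    simp only [PySem.List.enumerate_cons, List.flatMap_cons, cellsFrom]
    rw [h1, h2]

lemma subset_singleton (l : List Char) (chk : Char) :
    PySem.Set.issubset (PySem.Set.ofList l) (PySem.Set.add PySem.Set.empty chk)
      = l.all (· == chk) := by
  have hset : PySem.Set.add PySem.Set.empty chk = [chk] := by rfl
  rw [hset]
  rw [Bool.eq_iff_iff]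
  simp only [PySem.Set.issubset, List.all_eq_true]
  constructor
  · intro h x hx
    have := h x ((PySem.Set.mem_ofList l x).2 hx)
    simpa [PySem.Set.contains] using this
  · intro h x hx
    have := h x ((PySem.Set.mem_ofList l x).1 hx)
    simpa [PySem.Set.contains] using this

lemma contains_ofList (l : List Char) (x : Char) :
    PySem.Set.contains (PySem.Set.ofList l) x = l.contains x := by
  rw [Bool.eq_iff_iff]
  simp [PySem.Set.contains, PySem.Set.mem_ofList]

lemma combine (p : Int) (chk : Char) (cells : List (Int × Char)) :
    ((cells.filterMap (fun qc => if qc.1 = p then some qc.2 else none)).all (· == chk)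
      && !((cells.filterMap (fun qc => if qc.1 ≠ p then some qc.2 else none)).contains chk))
    = cells.all (okCell p chk) := by
  induction cells with
  | nil => simp
  | cons qc rest ih =>
    simp only [List.filterMap_cons]
    by_cases h : qc.1 = p
    · simp only [if_pos h, if_neg (by simp [h] : ¬ qc.1 ≠ p)]
      rw [List.all_cons, Bool.and_assoc, ih, List.all_cons]
      simp [okCell, h]
    · simp only [if_neg h, if_pos h]
      rw [List.contains_cons, Bool.not_or, BEq.comm, Bool.and_left_comm, ih, List.all_cons]
      have hqp : (qc.1 == p) = false := by simpa using h
      simp [okCell, hqp]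

lemma ableToDraw_alt_char (board : List String) :
    ableToDraw_alt board
      = (match cellsFrom 0 board with
         | [] => "Possible"
         | (p, c) :: rest => if rest.all (okCell p c) then "Possible" else "Impossible") := by
  unfold ableToDraw_alt
  rw [altCells_eq]
  cases h : cellsFrom 0 board with
  | nil => simp
  | cons pc rest =>
    obtain ⟨p, c⟩ := pc
    simp only [subset_singleton, contains_ofList, combine]
    have hok : okCell p c (p, c) = true := by simp [okCell]
    rw [List.all_cons, hok, Bool.true_and]

-- ===== VERDICT (by name: the statement is the Claim_ definition above) =====
theorem ableToDraw_spec : Claim_equal_ableToDraw := by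
  intro board _
  unfold Spec_ableToDraw
  rw [ableToDraw_char, ableToDraw_alt_char]
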